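-- pv_equiv track=rewrite | github.com/BarryBaker/plo_poker_gto_trees | tree/_utils.py | split_lines_tostreets
-- ===== SOURCE A (Python) =====
-- def split_lines_tostreets(line: list[str]):
--     cs = [i for i in line if i == "C"]
--     if len(cs) == 0 or (len(cs) == 1 and line[0] == "C"):
--         return line, []
--
--     if line[0] == "C":
--         otherC = [k for k, n in enumerate(line) if n == "C"][1]
--     else:
--         otherC = [k for k, n in enumerate(line) if n == "C"][0]
--     flopLine = line[: otherC + 1]
--     turnLine = line[otherC + 1 :]
--     if len(turnLine) == 0:
--         turnLine = [""]
--     return flopLine, turnLine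
-- ===== SOURCE B (Python) =====
-- def split_lines_tostreets(line: list[str]):
--     # single early-terminating scan: split at the first "C" at index >= 1
--     for i in range(1, len(line)):
--         if line[i] == "C":
--             return line[: i + 1], (line[i + 1 :] or [""])
--     return line, []
-- ===== Notes on version B (the rewrite author's own statement) =====
-- stated objective: simpler
-- what changed: Replaced the three sequential passes (count all C's, enumerate-and-index the C positions, branch on line[0]) by a single early-terminating scan for the first C at index >= 1, which is the split point in every case.
import Mathlib
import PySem

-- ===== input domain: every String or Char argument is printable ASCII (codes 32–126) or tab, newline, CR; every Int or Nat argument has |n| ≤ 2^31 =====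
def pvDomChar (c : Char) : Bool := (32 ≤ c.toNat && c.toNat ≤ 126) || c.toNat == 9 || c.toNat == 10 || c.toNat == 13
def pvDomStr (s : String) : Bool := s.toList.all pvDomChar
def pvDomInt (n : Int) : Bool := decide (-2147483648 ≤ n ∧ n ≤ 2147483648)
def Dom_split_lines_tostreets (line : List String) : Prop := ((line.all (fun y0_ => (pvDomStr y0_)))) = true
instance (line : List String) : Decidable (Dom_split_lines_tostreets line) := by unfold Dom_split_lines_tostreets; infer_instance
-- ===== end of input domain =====

-- B replaces A's three passes (count the C's, enumerate the C indices, branch on the head)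
-- by one early-terminating scan for the first "C" at index >= 1 (objective: simpler).


-- ===== PORT A =====
-- literal transliteration of A; the Python index accesses idxs[1] / idxs[0] are rendered
-- with pyGetD (A's code only reaches them when the index is in range, so the default is unused)
def split_lines_tostreets (line : List String) : List String × List String :=
  let cs := line.filter (fun i => i == "C")
  if cs.length = 0 ∨ (cs.length = 1 ∧ PySem.List.pyGet? line 0 = some "C") then
    (line, [])
  else
    let otherC : Int :=
      if PySem.List.pyGet? line 0 = some "C" then
        PySem.List.pyGetD (((PySem.List.enumerate line 0).filter (fun p => p.2 == "C")).map (fun p => p.1)) 1 0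
      else
        PySem.List.pyGetD (((PySem.List.enumerate line 0).filter (fun p => p.2 == "C")).map (fun p => p.1)) 0 0
    let flopLine := PySem.List.slice line none (some (otherC + 1))
    let turnLine := PySem.List.slice line (some (otherC + 1)) none
    let turnLine := if turnLine.length = 0 then ([""] : List String) else turnLine
    (flopLine, turnLine)

-- ===== PORT B =====
-- Source B's 'for i in range(1, len(line))' scan with early return at the first "C"
def split_lines_tostreets_alt_loop (line : List String) (i : Nat) : List String × List String :=
  if h : i < line.length then
    if (line)[i] = "C" then
      let turn := PySem.List.slice line (some ((i : Int) + 1)) none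
      (PySem.List.slice line none (some ((i : Int) + 1)), if turn = [] then [""] else turn)
    else
      split_lines_tostreets_alt_loop line (i + 1)
  else
    (line, [])
termination_by line.length - i

def split_lines_tostreets_alt (line : List String) : List String × List String :=
  split_lines_tostreets_alt_loop line 1

-- ===== PRECONDITION & SPEC =====
def Spec_split_lines_tostreets (line : List String) (out : List String × List String) : Prop := out = split_lines_tostreets_alt line
instance (line : List String) (out : List String × List String) : Decidable (Spec_split_lines_tostreets line out) := by unfold Spec_split_lines_tostreets; infer_instance

-- ===== CLAIM (what is proved, stated in full; the proofs are below) =====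
def Claim_equal_split_lines_tostreets : Prop := ∀ (line : List String), Dom_split_lines_tostreets line → Spec_split_lines_tostreets line (split_lines_tostreets line)

-- ===== LEMMAS AND PROOFS =====

theorem enumFilter_nil (p : List String) (s : Int) (h : "C" ∉ p) :
    (PySem.List.enumerate p s).filter (fun x => x.2 == "C") = [] := by
  induction p generalizing s with
  | nil => simp [PySem.List.enumerate_nil]
  | cons a as ih =>
    have ha : a ≠ "C" := by intro he; exact h (he ▸ List.mem_cons_self)
    have has : "C" ∉ as := fun hx => h (List.mem_cons_of_mem a hx)
    simp [PySem.List.enumerate_cons, ha, ih _ has]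

theorem filter_eq_nil_of_not_mem (p : List String) (h : "C" ∉ p) :
    p.filter (fun i => i == "C") = [] := by
  rw [List.filter_eq_nil_iff]
  intro a ha hb
  exact h (by simpa using (beq_iff_eq.mp hb ▸ ha))

theorem first_split (t : List String) (h : "C" ∈ t) :
    ∃ p q, t = p ++ "C" :: q ∧ "C" ∉ p := by
  induction t with
  | nil => cases h
  | cons a as ih =>
    by_cases ha : a = "C"
    · exact ⟨[], as, by simp [ha], by simp⟩
    · have : "C" ∈ as := by
        rcases List.mem_cons.mp h with h1 | h1
        · exact absurd h1.symm ha
        · exact h1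
      obtain ⟨p, q, hpq, hnp⟩ := ih this
      exact ⟨a :: p, q, by simp [hpq], by simp [hnp]; exact fun he => ha he.symm⟩

-- B's loop returns (line, []) when no "C" occurs at or after index i
theorem altLoop_none (line : List String) (i : Nat)
    (h : ∀ k, i ≤ k → (hk : k < line.length) → (line)[k] ≠ "C") :
    split_lines_tostreets_alt_loop line i = (line, []) := by
  fun_induction split_lines_tostreets_alt_loop line i with
  | case1 i hlt hC => exact absurd hC (h i le_rfl hlt)
  | case2 i hlt hC ih => exact ih (fun k hk hk2 => h k (by omega) hk2)
  | case3 i hge => rfl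

-- B's loop splits at the first "C" at index j ≥ i
theorem altLoop_found (line : List String) (i j : Nat) (hj : j < line.length)
    (hij : i ≤ j) (hC : (line)[j] = "C")
    (hmin : ∀ k, i ≤ k → k < j → (hk : k < line.length) → (line)[k] ≠ "C") :
    split_lines_tostreets_alt_loop line i =
      (PySem.List.slice line none (some ((j : Int) + 1)),
       let turn := PySem.List.slice line (some ((j : Int) + 1)) none;
       if turn = [] then [""] else turn) := by
  fun_induction split_lines_tostreets_alt_loop line i with
  | case1 i hlt hC' =>
    have : i = j := by
      by_contra hne
      exact hmin i le_rfl (by omega) hlt hC'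
    subst this; rfl
  | case2 i hlt hC' ih =>
    have hij' : i + 1 ≤ j := by
      rcases Nat.lt_or_ge i j with h1 | h1
      · omega
      · have : i = j := by omega
        subst this; exact absurd hC hC'
    exact ih hij' (fun k hk hk2 hk3 => hmin k (by omega) hk2 hk3)
  | case3 i hge => omega

theorem ports_agree (line : List String) : split_lines_tostreets line = split_lines_tostreets_alt line := by
  match line with
  | [] =>
    rw [split_lines_tostreets_alt, altLoop_none [] 1 (fun k hk hk2 => absurd hk2 (by simp))]
    simp [split_lines_tostreets]
  | h :: t =>
    by_cases hm : "C" ∈ t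
    · obtain ⟨p, q, rfl, hnp⟩ := first_split t hm
      have hfp : p.filter (fun i => i == "C") = [] := filter_eq_nil_of_not_mem p hnp
      have hef : (PySem.List.enumerate p (1:Int)).filter (fun x => x.2 == "C") = [] :=
        enumFilter_nil p 1 hnp
      have hj : p.length + 1 < (h :: (p ++ "C" :: q)).length := by simp; try omega
      have hC : (h :: (p ++ "C" :: q))[p.length + 1]'hj = "C" := by
        simp
      have hmin : ∀ k, 1 ≤ k → k < p.length + 1 → (hk : k < (h :: (p ++ "C" :: q)).length) →
          (h :: (p ++ "C" :: q))[k] ≠ "C" := by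
        intro k hk1 hk2 hk3
        obtain ⟨k', rfl⟩ : ∃ k', k = k' + 1 := ⟨k - 1, by omega⟩
        have hk' : k' < p.length := by omega
        simp only [List.getElem_cons_succ]
        rw [List.getElem_append_left hk']
        intro he
        exact hnp (he ▸ List.getElem_mem hk')
      have hB := altLoop_found (h :: (p ++ "C" :: q)) 1 (p.length + 1) hj (by omega) hC hmin
      rw [split_lines_tostreets_alt, hB]
      have hadd : ((1 : Int) + ↑p.length) = (↑p.length + 1 : Int) := by ring
      by_cases hh : h = "C"
      · simp [split_lines_tostreets, List.filter_append, hh, hfp,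
          PySem.List.pyGet?_zero_cons, PySem.List.enumerate_cons, PySem.List.enumerate_append, hef,
          PySem.List.pyGetD]
        try rw [hadd]
        try exact ⟨rfl, rfl⟩
      · simp [split_lines_tostreets, List.filter_append, hh, hfp,
          PySem.List.pyGet?_zero_cons, PySem.List.enumerate_cons, PySem.List.enumerate_append, hef,
          PySem.List.pyGetD]
        try rw [hadd]
        try exact ⟨rfl, rfl⟩
    · have hB := altLoop_none (h :: t) 1 (by
        intro k hk1 hk2
        obtain ⟨k', rfl⟩ : ∃ k', k = k' + 1 := ⟨k - 1, by omega⟩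
        simp only [List.getElem_cons_succ]
        intro he
        exact hm (he ▸ List.getElem_mem (by simpa using hk2)))
      rw [split_lines_tostreets_alt, hB]
      have hf : t.filter (fun i => i == "C") = [] := filter_eq_nil_of_not_mem t hm
      by_cases hh : h = "C"
      · simp [split_lines_tostreets, hh, hf, PySem.List.pyGet?_zero_cons]
      · simp [split_lines_tostreets, hh, hf]

-- ===== VERDICT (by name: the statement is the Claim_ definition above) =====
theorem split_lines_tostreets_spec : Claim_equal_split_lines_tostreets := by
  intro line _
  exact ports_agree line
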